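-- pv_equiv track=rewrite | github.com/scholer/rsenv | rsenv/dataanalysis/qpcr/qpcr_samplemanager.py | rsplit_integers
-- ===== SOURCE A (Python) =====
-- def rsplit_integers(samplename, sep=None, maxsplit=1):
--     """
--     Recursively removes an integer from the right.
--         <maxsplit> determines how many splits are maximally allowed. (Default=1)
--         <sep> determines which string is used to split. (Default is same as string rsplit: any whitespace)
--     Returns
--         <head>      : The remainder of the string after stripping integers.
--         <integers>  : list of integers stripped.
--     """
--     integers = list()
--     if not maxsplit or maxsplit < 1:
--         #print maxsplit, " - maxsplit is", maxsplit, "returning samplename and integers: ", samplename, integers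
--         return samplename, integers
--     try:
--         head, number = samplename.rsplit(sep, 1)
--         number = int(number)
--     except ValueError as e:
--         ## Is raised either if unpacking or int() conversion failed.
--         #print maxsplit, " - ValueError", e, "raised, returning samplename and integers: ", samplename, integers
--         return samplename, integers
--     else:
--         samplename = head
--     ## Overwrite existing integers and samplename with that returned by recursing:
--     samplename, integers = rsplit_integers(samplename, sep, maxsplit-1)
--     integers.append(number)
--     #print maxsplit, " - All ok, returning samplename and integers: ", samplename, integers
--     return samplename, integers
-- ===== SOURCE B (Python) =====
-- def rsplit_integers(samplename, sep=None, maxsplit=1):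
--     """Index-based scan: keep a single `end` index into the original string,
--     locate each trailing token by character positions (whitespace skipping or
--     rfind), and slice the head once at the end."""
--     s = samplename
--     integers = []
--     end = len(s)
--     count = 0
--     while count < (maxsplit or 0):
--         if sep is None:
--             j = end
--             while j > 0 and s[j - 1].isspace():
--                 j -= 1
--             i = j
--             while i > 0 and not s[i - 1].isspace():
--                 i -= 1
--             if i == j:
--                 break
--             h = i
--             while h > 0 and s[h - 1].isspace():
--                 h -= 1
--             if h == 0:
--                 break
--             token = s[i:j]
--         else:
--             if sep == '':
--                 break
--             idx = s.rfind(sep, 0, end)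
--             if idx == -1:
--                 break
--             h = idx
--             token = s[idx + len(sep):end]
--         try:
--             number = int(token)
--         except ValueError:
--             break
--         integers.append(number)
--         end = h
--         count += 1
--     integers.reverse()
--     return s[:end], integers
-- ===== Notes on version B (the rewrite author's own statement) =====
-- stated objective: alternative
-- what changed: Replaces A's recursion, which rebuilds a fresh head string at every split and appends into the list returned by the recursive call, with a flat loop that keeps a single end index into the original string, locates each trailing token by character positions (whitespace skipping / rfind bounded by the index), and slices the head and reverses the collected list once at the end.
import Mathlib
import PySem

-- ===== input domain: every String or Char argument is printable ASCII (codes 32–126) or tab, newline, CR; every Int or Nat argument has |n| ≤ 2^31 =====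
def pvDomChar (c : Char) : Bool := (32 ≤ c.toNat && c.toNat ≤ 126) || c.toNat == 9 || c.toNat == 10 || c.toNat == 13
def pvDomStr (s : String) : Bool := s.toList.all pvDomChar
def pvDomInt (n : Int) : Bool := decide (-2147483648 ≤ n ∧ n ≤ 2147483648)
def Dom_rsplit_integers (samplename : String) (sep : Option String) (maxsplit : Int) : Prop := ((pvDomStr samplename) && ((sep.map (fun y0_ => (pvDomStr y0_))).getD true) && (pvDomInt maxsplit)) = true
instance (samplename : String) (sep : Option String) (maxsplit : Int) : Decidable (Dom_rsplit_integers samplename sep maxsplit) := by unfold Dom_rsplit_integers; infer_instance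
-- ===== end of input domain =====

-- B replaces A's recursion (which rebuilds a fresh head string at every step) by an
-- index-based scan keeping a single end index into the original string; the returned
-- values are proved equal on the whole domain.

-- Python's whitespace set restricted to Dom's characters (space, tab, \n, \r) — exact on Dom.
def pvIsPySpace (c : Char) : Bool := c = ' ' || c = '\t' || c = '\n' || c = '\r'

-- ===== PORT A =====
-- head, number = samplename.rsplit(sep, 1); ValueError (unpacking / empty separator) -> none.
def pvARsplit1 (cs : List Char) (sep : Option String) : Option (List Char × List Char) :=
  match sep with
  | none =>
    let rev := cs.reverse.dropWhile pvIsPySpace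
    let word := rev.takeWhile (fun c => !pvIsPySpace c)
    let rest := rev.dropWhile (fun c => !pvIsPySpace c)
    let headRev := rest.dropWhile pvIsPySpace
    if word = [] ∨ headRev = [] then none
    else some (headRev.reverse, word.reverse)
  | some sp =>
    let p := sp.toList
    if p = [] then none
    else
      match (List.range (cs.length + 1)).foldl
          (fun acc i => if p.isPrefixOf (cs.drop i) then some i else acc) none with
      | none => none
      | some i => some (cs.take i, cs.drop (i + p.length))

-- the try-block: rsplit then int(number); none = ValueError.
def pvAStep (s : String) (sep : Option String) : Option (String × Int) :=
  match pvARsplit1 s.toList sep with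
  | none => none
  | some (h, numCs) =>
    match PySem.Int.ofChars? numCs with
    | none => none
    | some n => some (String.ofList h, n)

def rsplit_integers (samplename : String) (sep : Option String) (maxsplit : Int) : String × List Int :=
  if maxsplit = 0 ∨ maxsplit < 1 then (samplename, [])
  else
    match pvAStep samplename sep with
    | none => (samplename, [])
    | some (head, number) =>
      let r := rsplit_integers head sep (maxsplit - 1)
      (r.1, r.2 ++ [number])
termination_by maxsplit.toNat
decreasing_by omega

-- ===== PORT B =====
-- `while j > 0 and p(s[j-1]): j -= 1` — the index left of the p-run ending at j.
def pvSkip (p : Char → Bool) (cs : List Char) : Nat → Nat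
  | 0 => 0
  | j + 1 => if p (cs.getD j ' ') then pvSkip p cs j else j + 1

-- s.rfind(sep, 0, end) on the head slice t = s[:end]: hand port, exact — the highest
-- position where sep occurs inside t (scanned from the top), none = -1.
def pvRFindB (t p : List Char) : Nat → Option Nat
  | 0 => if p.isPrefixOf t then some 0 else none
  | i + 1 => if p.isPrefixOf (t.drop (i + 1)) then some (i + 1) else pvRFindB t p i

-- one loop iteration: locate the trailing token inside cs[:e]; some (newEnd, int) or none (break).
def pvStepB (cs : List Char) (sep : Option String) (e : Nat) : Option (Nat × Int) :=
  match sep with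
  | none =>
    let j := pvSkip pvIsPySpace cs e
    let i := pvSkip (fun c => !pvIsPySpace c) cs j
    if i = j then none
    else
      let h := pvSkip pvIsPySpace cs i
      if h = 0 then none
      else
        match PySem.Int.ofChars? ((cs.take j).drop i) with
        | none => none
        | some n => some (h, n)
  | some sp =>
    let p := sp.toList
    if p = [] then none
    else
      let t := cs.take e
      match pvRFindB t p t.length with
      | none => none
      | some idx =>
        match PySem.Int.ofChars? (t.drop (idx + p.length)) with
        | none => none
        | some n => some (idx, n)

-- `while count < (maxsplit or 0)` with the end index and the collected list as state.
def pvBLoop (cs : List Char) (sep : Option String) : Nat → Nat → List Int → Nat × List Int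
  | e, 0, acc => (e, acc)
  | e, k + 1, acc =>
    match pvStepB cs sep e with
    | none => (e, acc)
    | some (h, n) => pvBLoop cs sep h k (acc ++ [n])

def rsplit_integers_alt (samplename : String) (sep : Option String) (maxsplit : Int) : String × List Int :=
  let cs := samplename.toList
  let r := pvBLoop cs sep cs.length maxsplit.toNat []
  (String.ofList (cs.take r.1), r.2.reverse)

-- ===== PRECONDITION & SPEC =====
def Spec_rsplit_integers (samplename : String) (sep : Option String) (maxsplit : Int) (out : String × List Int) : Prop := out = rsplit_integers_alt samplename sep maxsplit
instance (samplename : String) (sep : Option String) (maxsplit : Int) (out : String × List Int) : Decidable (Spec_rsplit_integers samplename sep maxsplit out) := by unfold Spec_rsplit_integers; infer_instance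

-- ===== CLAIM (what is proved, stated in full; the proofs are below) =====
def Claim_equal_rsplit_integers : Prop := ∀ (samplename : String) (sep : Option String) (maxsplit : Int), Dom_rsplit_integers samplename sep maxsplit → Spec_rsplit_integers samplename sep maxsplit (rsplit_integers samplename sep maxsplit)

-- ===== LEMMAS AND PROOFS =====
theorem pvSkip_le (p : Char → Bool) (cs : List Char) : ∀ e, pvSkip p cs e ≤ e := by
  intro e
  induction e with
  | zero => simp [pvSkip]
  | succ j ih =>
    simp only [pvSkip]
    split
    · omega
    · omega

theorem pvSkip_spec (p : Char → Bool) (cs : List Char) :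
    ∀ e, e ≤ cs.length →
      pvSkip p cs e = ((cs.take e).reverse.dropWhile p).length ∧
      cs.take (pvSkip p cs e) = ((cs.take e).reverse.dropWhile p).reverse := by
  intro e
  induction e with
  | zero => simp [pvSkip]
  | succ j ih =>
    intro he
    have hj : j < cs.length := by omega
    have hget : cs.getD j ' ' = cs[j] := List.getD_eq_getElem cs ' ' hj
    have htake : cs.take (j + 1) = cs.take j ++ [cs[j]] := by
      rw [List.take_add_one]
      simp [List.getElem?_eq_getElem hj]
    have hrev : (cs.take (j + 1)).reverse = cs[j] :: (cs.take j).reverse := by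
      rw [htake]; simp
    obtain ⟨ih1, ih2⟩ := ih (by omega)
    simp only [pvSkip, hget, hrev, List.dropWhile_cons]
    by_cases hp : p cs[j] = true
    · rw [if_pos hp, if_pos hp]
      exact ⟨ih1, ih2⟩
    · rw [if_neg hp, if_neg hp]
      refine ⟨?_, ?_⟩
      · simp [List.length_take]; omega
      · rw [← hrev, List.reverse_reverse]

theorem pvRFindB_le (t p : List Char) : ∀ n i, pvRFindB t p n = some i → i ≤ n := by
  intro n
  induction n with
  | zero => intro i h; simp only [pvRFindB] at h; split at h <;> simp_all
  | succ k ih =>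
    intro i h
    simp only [pvRFindB] at h
    split at h
    · simp_all
    · exact le_trans (ih i h) (by omega)

theorem pvRFindB_eq_foldl (t p : List Char) :
    ∀ n, (List.range (n + 1)).foldl
        (fun acc i => if p.isPrefixOf (t.drop i) then some i else acc) none
      = pvRFindB t p n := by
  intro n
  induction n with
  | zero => simp [List.range_one, pvRFindB]
  | succ k ih =>
    rw [List.range_succ, List.foldl_append, ih]
    simp [pvRFindB]

theorem pvStepB_le (cs : List Char) (sep : Option String) (e : Nat) :
    ∀ h n, pvStepB cs sep e = some (h, n) → h ≤ e := by
  intro h n hs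
  cases sep with
  | none =>
    have h1 : pvSkip pvIsPySpace cs e ≤ e := pvSkip_le _ _ e
    have h2 : pvSkip (fun c => !pvIsPySpace c) cs (pvSkip pvIsPySpace cs e) ≤ pvSkip pvIsPySpace cs e :=
      pvSkip_le _ _ _
    have h3 : pvSkip pvIsPySpace cs (pvSkip (fun c => !pvIsPySpace c) cs (pvSkip pvIsPySpace cs e)) ≤
        pvSkip (fun c => !pvIsPySpace c) cs (pvSkip pvIsPySpace cs e) := pvSkip_le _ _ _
    simp only [pvStepB] at hs
    split_ifs at hs
    split at hs
    · exact absurd hs (by simp)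
    · injection hs with hs'
      have := congrArg Prod.fst hs'
      simp at this
      omega
  | some sp =>
    simp only [pvStepB] at hs
    split_ifs at hs
    split at hs
    · exact absurd hs (by simp)
    · rename_i idx hfind
      have hidx : idx ≤ (cs.take e).length := pvRFindB_le _ _ _ _ hfind
      split at hs
      · exact absurd hs (by simp)
      · injection hs with hs'
        have := congrArg Prod.fst hs'
        simp [List.length_take] at this hidx
        omega

theorem pvStepB_eq (cs : List Char) (sep : Option String) (e : Nat) (he : e ≤ cs.length) :
    pvAStep (String.ofList (cs.take e)) sep =
      (pvStepB cs sep e).map (fun r => (String.ofList (cs.take r.1), r.2)) := by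
  cases sep with
  | none =>
    have hjle : pvSkip pvIsPySpace cs e ≤ e := pvSkip_le _ _ e
    obtain ⟨hj1, hj2⟩ := pvSkip_spec pvIsPySpace cs e he
    obtain ⟨hi1, hi2⟩ := pvSkip_spec (fun c => !pvIsPySpace c) cs (pvSkip pvIsPySpace cs e) (by omega)
    rw [hj2, List.reverse_reverse] at hi1 hi2
    have hile : pvSkip (fun c => !pvIsPySpace c) cs (pvSkip pvIsPySpace cs e) ≤ pvSkip pvIsPySpace cs e :=
      pvSkip_le _ _ _
    obtain ⟨hh1, hh2⟩ := pvSkip_spec pvIsPySpace cs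
      (pvSkip (fun c => !pvIsPySpace c) cs (pvSkip pvIsPySpace cs e)) (by omega)
    rw [hi2, List.reverse_reverse] at hh1 hh2
    simp only [pvAStep, pvARsplit1, String.toList_ofList, pvStepB]
    -- abbreviations matching A's lets (folded in the goal and all hypotheses)
    set rev := ((cs.take e).reverse.dropWhile pvIsPySpace) with hrev
    set word := rev.takeWhile (fun c => !pvIsPySpace c) with hword
    set rest := rev.dropWhile (fun c => !pvIsPySpace c) with hrest
    set headRev := rest.dropWhile pvIsPySpace with hheadRev
    have hsplit : word ++ rest = rev := List.takeWhile_append_dropWhile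
    have hlen : rev.length = word.length + rest.length := by
      rw [← hsplit]; simp
    have htok : (cs.take (pvSkip pvIsPySpace cs e)).drop
        (pvSkip (fun c => !pvIsPySpace c) cs (pvSkip pvIsPySpace cs e)) = word.reverse := by
      rw [hj2, hi1, ← hsplit, List.reverse_append]
      exact List.drop_left' (by simp)
    by_cases hw : word = []
    · have hij : pvSkip (fun c => !pvIsPySpace c) cs (pvSkip pvIsPySpace cs e) = pvSkip pvIsPySpace cs e := by
        rw [hi1, hj1]
        simp [hw] at hlen ⊢
        omega
      rw [if_pos (Or.inl hw), if_pos hij]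
      rfl
    · have hij : pvSkip (fun c => !pvIsPySpace c) cs (pvSkip pvIsPySpace cs e) ≠ pvSkip pvIsPySpace cs e := by
        rw [hi1, hj1]
        have : word.length ≠ 0 := by simpa using hw
        omega
      by_cases hhr : headRev = []
      · have hh0 : pvSkip pvIsPySpace cs
            (pvSkip (fun c => !pvIsPySpace c) cs (pvSkip pvIsPySpace cs e)) = 0 := by
          rw [hh1, hhr]; rfl
        rw [if_pos (Or.inr hhr), if_neg hij, if_pos hh0]
        rfl
      · have hh0 : pvSkip pvIsPySpace cs
            (pvSkip (fun c => !pvIsPySpace c) cs (pvSkip pvIsPySpace cs e)) ≠ 0 := by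
          rw [hh1]
          simpa using hhr
        have hcond : ¬ (word = [] ∨ headRev = []) := by
          rintro (h | h) <;> contradiction
        rw [if_neg hcond, if_neg hij, if_neg hh0, htok]
        cases hparse : PySem.Int.ofChars? word.reverse with
        | none => simp [hparse]
        | some n => simp [hparse, hh2]
  | some sp =>
    simp only [pvAStep, pvARsplit1, String.toList_ofList, pvStepB]
    by_cases hp : sp.toList = []
    · simp [hp]
    · rw [if_neg hp, if_neg hp, pvRFindB_eq_foldl]
      cases hfind : pvRFindB (cs.take e) sp.toList (cs.take e).length with
      | none => rfl
      | some idx =>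
        have hidx : idx ≤ e := by
          have := pvRFindB_le _ _ _ _ hfind
          simp [List.length_take] at this
          omega
        have htt : (cs.take e).take idx = cs.take idx := by
          rw [List.take_take]
          congr 1
          omega
        cases hparse : PySem.Int.ofChars? ((cs.take e).drop (idx + sp.length)) with
        | none => simp [hparse]
        | some n => simp [hparse, htt]

theorem pvBLoop_corr (cs : List Char) (sep : Option String) :
    ∀ (k : Nat) (m : Int), m.toNat = k → ∀ (e : Nat) (acc : List Int), e ≤ cs.length →
      ∃ e' ints, pvBLoop cs sep e k acc = (e', acc ++ ints) ∧ e' ≤ e ∧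
        rsplit_integers (String.ofList (cs.take e)) sep m = (String.ofList (cs.take e'), ints.reverse) := by
  intro k
  induction k with
  | zero =>
    intro m hm e acc he
    refine ⟨e, [], by simp [pvBLoop], le_rfl, ?_⟩
    rw [rsplit_integers]
    simp only [if_pos (by omega : m = 0 ∨ m < 1)]
    simp
  | succ k ih =>
    intro m hm e acc he
    have hguard : ¬ (m = 0 ∨ m < 1) := by omega
    cases hstep : pvStepB cs sep e with
    | none =>
      have hA := pvStepB_eq cs sep e he
      rw [hstep] at hA
      refine ⟨e, [], by simp [pvBLoop, hstep], le_rfl, ?_⟩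
      rw [rsplit_integers]
      simp only [if_neg hguard]
      rw [hA]
      simp
    | some hn =>
      obtain ⟨h, n⟩ := hn
      have hA := pvStepB_eq cs sep e he
      rw [hstep] at hA
      simp only [Option.map_some] at hA
      have hle : h ≤ e := pvStepB_le cs sep e h n hstep
      obtain ⟨e'', ints', hb, hle', hr⟩ := ih (m - 1) (by omega) h (acc ++ [n]) (by omega)
      refine ⟨e'', n :: ints', ?_, by omega, ?_⟩
      · simp only [pvBLoop, hstep, hb, List.append_assoc, List.singleton_append]
      · rw [rsplit_integers]
        simp only [if_neg hguard]
        rw [hA]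
        simp only [hr]
        simp

-- ===== VERDICT (by name: the statement is the Claim_ definition above) =====
theorem rsplit_integers_spec : Claim_equal_rsplit_integers := by
  intro samplename sep maxsplit _
  unfold Spec_rsplit_integers rsplit_integers_alt
  obtain ⟨e', ints, h1, h2, h3⟩ :=
    pvBLoop_corr samplename.toList sep maxsplit.toNat maxsplit rfl samplename.toList.length [] le_rfl
  rw [List.take_length, String.ofList_toList] at h3
  simp only [h1, h3, List.nil_append]
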